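-- pv_equiv track=rewrite | github.com/Aiza-Lee/template_builder | scripts/latex_styler.py | _apply_standard_font_config
-- ===== SOURCE A (Python) =====
-- def _apply_standard_font_config(tex_content: str, font_size_formatted: str, font_size_raw: str) -> str:
--     """应用标准字体配置"""
--     # 替换基本样式中的字体大小
--     for size in ['tiny', 'small', 'normalsize', 'large']:
--         if size != font_size_raw:
--             tex_content = tex_content.replace(
--                 f'basicstyle=\\{size}\\ttfamily',
--                 f'basicstyle=\\{font_size_formatted}\\ttfamily'
--             )
--
--     return tex_content
-- ===== SOURCE B (Python) =====
-- def _apply_standard_font_config(tex_content: str, font_size_formatted: str, font_size_raw: str) -> str: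
--     """应用标准字体配置 — single left-to-right scan instead of four full-text replace passes."""
--     sizes = ('tiny', 'small', 'normalsize', 'large')
--     patterns = {s: 'basicstyle=\\' + s + '\\ttfamily' for s in sizes}
--     repl = 'basicstyle=\\' + font_size_formatted + '\\ttfamily'
--     out = []
--     i = 0
--     n = len(tex_content)
--     while i < n:
--         for s in sizes:
--             if s != font_size_raw and tex_content.startswith(patterns[s], i):
--                 out.append(repl)
--                 i += 21 + len(s)
--                 break
--         else:
--             out.append(tex_content[i])
--             i += 1
--     return ''.join(out)
-- ===== Notes on version B (the rewrite author's own statement) =====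
-- stated objective: alternative
-- what changed: A makes four sequential full-text str.replace passes (one per size); B makes one left-to-right scan over tex_content, emitting the replacement at each pattern match and copying every other character once. Pre_ excludes inputs whose font_size_formatted contains a backslash while tex_content contains a replaceable basicstyle pattern: there A's later replace passes may re-match and rewrite text that an earlier pass just inserted (a cascade of sequential replace), while B's single pass never rescans its own output; …
import Mathlib
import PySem

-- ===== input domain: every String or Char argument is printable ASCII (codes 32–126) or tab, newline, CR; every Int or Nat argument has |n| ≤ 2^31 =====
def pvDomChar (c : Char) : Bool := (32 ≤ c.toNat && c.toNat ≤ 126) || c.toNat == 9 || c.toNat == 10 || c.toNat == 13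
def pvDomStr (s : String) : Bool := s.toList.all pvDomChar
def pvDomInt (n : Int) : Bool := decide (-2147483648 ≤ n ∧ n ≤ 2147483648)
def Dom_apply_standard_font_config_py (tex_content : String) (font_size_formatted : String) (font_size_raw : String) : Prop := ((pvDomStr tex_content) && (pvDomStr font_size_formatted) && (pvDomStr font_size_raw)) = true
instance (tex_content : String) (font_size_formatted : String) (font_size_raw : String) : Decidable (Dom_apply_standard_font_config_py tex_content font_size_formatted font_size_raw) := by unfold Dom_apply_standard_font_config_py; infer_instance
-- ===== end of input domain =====

-- B replaces A's four sequential full-text str.replace passes by one left-to-right scan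
-- (objective: alternative single-pass algorithm; not claimed faster).

-- `f'basicstyle=\\{s}\\ttfamily'` as a char list (shared constant of both ports and of Pre_)
def pvPat (s : List Char) : List Char := "basicstyle=\\".toList ++ s ++ "\\ttfamily".toList

-- ===== PORT A =====
-- literal port of A: a loop over the four sizes, each iteration a full-text str.replace.
-- The f-string concatenation is ported as String.ofList of the concatenated char lists (exact).
def apply_standard_font_config_py (tex_content : String) (font_size_formatted : String) (font_size_raw : String) : String :=
  List.foldl
    (fun acc size =>
      if size ≠ font_size_raw then
        PySem.Str.replace acc (String.ofList (pvPat size.toList))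
          (String.ofList (pvPat font_size_formatted.toList))
      else acc)
    tex_content ["tiny", "small", "normalsize", "large"]

-- ===== PORT B =====
-- literal port of B's while-loop: one scan with an index; `tex_content.startswith(pattern, i)`
-- at index i is ported as Chars.startswith on the remaining suffix (exact).
def pvAltScan (repl : List Char) (font_size_raw : String) : List Char → List Char
  | [] => []
  | c :: t =>
    if "tiny" ≠ font_size_raw ∧ PySem.Chars.startswith (c :: t) (pvPat "tiny".toList) then
      repl ++ pvAltScan repl font_size_raw (List.drop 24 t)
    else if "small" ≠ font_size_raw ∧ PySem.Chars.startswith (c :: t) (pvPat "small".toList) then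
      repl ++ pvAltScan repl font_size_raw (List.drop 25 t)
    else if "normalsize" ≠ font_size_raw ∧ PySem.Chars.startswith (c :: t) (pvPat "normalsize".toList) then
      repl ++ pvAltScan repl font_size_raw (List.drop 30 t)
    else if "large" ≠ font_size_raw ∧ PySem.Chars.startswith (c :: t) (pvPat "large".toList) then
      repl ++ pvAltScan repl font_size_raw (List.drop 25 t)
    else c :: pvAltScan repl font_size_raw t
  termination_by l => l.length
  decreasing_by all_goals simp

def apply_standard_font_config_py_alt (tex_content : String) (font_size_formatted : String) (font_size_raw : String) : String :=
  String.ofList (pvAltScan (pvPat font_size_formatted.toList) font_size_raw tex_content.toList)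

-- ===== PRECONDITION & SPEC =====
-- Pre_ excludes inputs whose font_size_formatted contains a backslash while tex_content contains a
-- replaceable basicstyle pattern: there A's later replace passes may re-match and rewrite text that an
-- earlier pass just inserted (a cascade of sequential replace), while B's single pass never rescans its
-- own output; both behaviours are defensible on such adversarial replacement strings, and the exclusion
-- is conservative because whether a cascade actually fires depends on fine alignment.
def Pre_apply_standard_font_config_py (tex_content : String) (font_size_formatted : String) (font_size_raw : String) : Prop :=
  (¬ '\\' ∈ font_size_formatted.toList) ∨
  (∀ s ∈ (["tiny", "small", "normalsize", "large"] : List String),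
      s ≠ font_size_raw → ¬ pvPat s.toList <:+: tex_content.toList)
instance (tex_content : String) (font_size_formatted : String) (font_size_raw : String) : Decidable (Pre_apply_standard_font_config_py tex_content font_size_formatted font_size_raw) := by unfold Pre_apply_standard_font_config_py; infer_instance

def pvWitness_apply_standard_font_config_py : String × String × String :=
  ("x basicstyle=\\tiny\\ttfamily y", "small", "large")

def Spec_apply_standard_font_config_py (tex_content : String) (font_size_formatted : String) (font_size_raw : String) (out : String) : Prop := out = apply_standard_font_config_py_alt tex_content font_size_formatted font_size_raw
instance (tex_content : String) (font_size_formatted : String) (font_size_raw : String) (out : String) : Decidable (Spec_apply_standard_font_config_py tex_content font_size_formatted font_size_raw out) := by unfold Spec_apply_standard_font_config_py; infer_instance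

-- ===== CLAIM (what is proved, stated in full; the proofs are below) =====
def Claim_equal_apply_standard_font_config_py : Prop := ∀ (tex_content : String) (font_size_formatted : String) (font_size_raw : String), Dom_apply_standard_font_config_py tex_content font_size_formatted font_size_raw → Pre_apply_standard_font_config_py tex_content font_size_formatted font_size_raw → Spec_apply_standard_font_config_py tex_content font_size_formatted font_size_raw (apply_standard_font_config_py tex_content font_size_formatted font_size_raw)

-- ===== LEMMAS AND PROOFS =====

-- structural version of CPython's str.replace (leftmost, non-overlapping), for nonempty `old`
def pvRep (old new : List Char) : List Char → List Char
  | [] => []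
  | c :: t =>
    if old.isPrefixOf (c :: t) then new ++ pvRep old new (List.drop (old.length - 1) t)
    else c :: pvRep old new t
  termination_by l => l.length
  decreasing_by all_goals simp

-- the scanner, generalized over the (ordered) list of active patterns
def pvScan (repl : List Char) (ps : List (List Char)) : List Char → List Char
  | [] => []
  | c :: t =>
    match ps.find? (fun p => p.isPrefixOf (c :: t)) with
    | some p => repl ++ pvScan repl ps (List.drop (p.length - 1) t)
    | none => c :: pvScan repl ps t
  termination_by l => l.length
  decreasing_by all_goals simp

-- the active-pattern list of port B, in check order
def pvPs (font_size_raw : String) : List (List Char) :=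
  (if "tiny" ≠ font_size_raw then [pvPat "tiny".toList] else []) ++
  (if "small" ≠ font_size_raw then [pvPat "small".toList] else []) ++
  (if "normalsize" ≠ font_size_raw then [pvPat "normalsize".toList] else []) ++
  (if "large" ≠ font_size_raw then [pvPat "large".toList] else [])

lemma pvRep_go (old new : List Char) (h : old ≠ []) :
    ∀ (fuel : ℕ) (l acc : List Char), l.length ≤ fuel →
      PySem.Chars.replace.go old new fuel l acc = acc.reverse ++ pvRep old new l := by
  intro fuel
  induction fuel with
  | zero =>
    intro l acc hl
    have : l = [] := List.eq_nil_of_length_eq_zero (Nat.le_zero.mp hl)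
    subst this
    rw [PySem.Chars.replace.go]; simp [pvRep]
  | succ fuel ih =>
    intro l acc hl
    match l with
    | [] => rw [PySem.Chars.replace.go]; simp [pvRep]; omega
    | c :: t =>
      obtain ⟨c₀, o, rfl⟩ : ∃ c₀ o, old = c₀ :: o := by
        cases old with
        | nil => exact absurd rfl h
        | cons a b => exact ⟨a, b, rfl⟩
      rw [PySem.Chars.replace.go]
      by_cases hp : (c₀ :: o).isPrefixOf (c :: t) = true
      · simp only [hp, if_pos]
        have hlen : (c₀ :: o) <+: (c :: t) := List.isPrefixOf_iff_prefix.mp hp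
        have hlen2 : o.length + 1 ≤ t.length + 1 := by
          simpa using hlen.length_le
        rw [ih (List.drop (c₀ :: o).length (c :: t)) (new.reverse ++ acc) (by simp only [List.length_drop, List.length_cons]; simp at hl; omega)]
        have hdrop : List.drop (c₀ :: o).length (c :: t) = List.drop ((c₀ :: o).length - 1) t := by
          simp [List.drop_succ_cons]
        rw [hdrop]
        conv_rhs => rw [pvRep]
        simp [hp]
      · simp only [hp]
        rw [ih t (c :: acc) (by simpa using Nat.le_of_succ_le_succ (Nat.succ_le_succ (by simpa using hl)))]
        conv_rhs => rw [pvRep]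
        simp [hp]

lemma pvReplace_eq (s old new : List Char) (h : old ≠ []) :
    PySem.Chars.replace s old new = pvRep old new s := by
  have : old.isEmpty = false := by cases old with | nil => exact absurd rfl h | cons a b => rfl
  rw [PySem.Chars.replace, this]
  simp only [Bool.false_eq_true, if_false]
  rw [pvRep_go old new h s.length s [] (le_refl _)]
  simp

lemma pvRep_head (old new rest : List Char) (h : old ≠ []) :
    pvRep old new (old ++ rest) = new ++ pvRep old new rest := by
  obtain ⟨c₀, o, rfl⟩ : ∃ c₀ o, old = c₀ :: o := by
    cases old with
    | nil => exact absurd rfl h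
    | cons a b => exact ⟨a, b, rfl⟩
  rw [List.cons_append, pvRep]
  have hp : (c₀ :: o).isPrefixOf (c₀ :: (o ++ rest)) = true := by
    rw [List.isPrefixOf_iff_prefix, List.cons_prefix_cons]
    exact ⟨rfl, List.prefix_append _ _⟩
  simp only [hp, if_pos]
  congr 1
  congr 1
  simp

lemma pvRep_skip (old new : List Char) :
    ∀ (v x : List Char), (∀ i < v.length, ¬ old.isPrefixOf (List.drop i (v ++ x))) →
      pvRep old new (v ++ x) = v ++ pvRep old new x := by
  intro v
  induction v with
  | nil => intro x _; simp
  | cons c v ih =>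
    intro x hv
    rw [List.cons_append, pvRep]
    have h0 : ¬ old.isPrefixOf (c :: (v ++ x)) = true := by
      have := hv 0 (by simp)
      simpa using this
    simp only [h0, if_neg, Bool.not_eq_true]
    rw [ih x (fun i hi => by simpa using hv (i+1) (by simpa using Nat.succ_lt_succ hi))]
    simp

lemma pvRep_id (old new : List Char) (cs : List Char)
    (h : ∀ i, ¬ old.isPrefixOf (List.drop i cs)) : pvRep old new cs = cs := by
  induction cs with
  | nil => rw [pvRep]
  | cons c t ih =>
    rw [pvRep]
    have h0 : ¬ old.isPrefixOf (c :: t) = true := by simpa using h 0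
    simp only [h0, if_neg, Bool.not_eq_true]
    rw [ih (fun i => by simpa using h (i+1))]

lemma pvScan_nil (repl : List Char) (cs : List Char) : pvScan repl [] cs = cs := by
  induction cs with
  | nil => rw [pvScan]
  | cons c t ih => rw [pvScan]; simp [ih]

lemma pvScan_empty (repl : List Char) (ps : List (List Char)) : pvScan repl ps [] = [] := by
  rw [pvScan]

lemma pvScan_cons_pos (repl : List Char) (ps : List (List Char)) (c : Char) (t p : List Char)
    (h : List.find? (fun p => p.isPrefixOf (c :: t)) ps = some p) :
    pvScan repl ps (c :: t) = repl ++ pvScan repl ps (List.drop (p.length - 1) t) := by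
  rw [pvScan, h]

lemma pvScan_cons_neg (repl : List Char) (ps : List (List Char)) (c : Char) (t : List Char)
    (h : List.find? (fun p => p.isPrefixOf (c :: t)) ps = none) :
    pvScan repl ps (c :: t) = c :: pvScan repl ps t := by
  rw [pvScan, h]

lemma pvScan_skip (repl : List Char) (ps : List (List Char)) :
    ∀ (v x : List Char), (∀ i < v.length, ∀ p ∈ ps, ¬ p.isPrefixOf (List.drop i (v ++ x))) →
      pvScan repl ps (v ++ x) = v ++ pvScan repl ps x := by
  intro v
  induction v with
  | nil => intro x _; simp
  | cons c v ih =>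
    intro x hv
    rw [List.cons_append]
    have hnone : (ps.find? (fun p => p.isPrefixOf (c :: (v ++ x)))) = none := by
      rw [List.find?_eq_none]
      intro p hp
      have := hv 0 (by simp) p hp
      simpa using this
    rw [pvScan_cons_neg _ _ _ _ hnone]
    rw [ih x (fun i hi p hp => by simpa using hv (i+1) (by simpa using Nat.succ_lt_succ hi) p hp)]
    simp

lemma pvScan_id (repl : List Char) (ps : List (List Char)) (cs : List Char)
    (h : ∀ i, ∀ p ∈ ps, ¬ p.isPrefixOf (List.drop i cs)) : pvScan repl ps cs = cs := by
  induction cs with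
  | nil => rw [pvScan]
  | cons c t ih =>
    have hnone : (ps.find? (fun p => p.isPrefixOf (c :: t))) = none := by
      rw [List.find?_eq_none]
      intro p hp
      simpa using h 0 p hp
    rw [pvScan_cons_neg _ _ _ _ hnone, ih (fun i p hp => by simpa using h (i+1) p hp)]

-- prefix reflection: a 'b'-free word that prefixes the scanner's output prefixes its input
lemma pvPR (repl : List Char) (hR : ∃ q, repl = 'b' :: q) (ps : List (List Char)) :
    ∀ (cs w : List Char), 'b' ∉ w → w <+: pvScan repl ps cs → w <+: cs := by
  intro cs
  induction cs using pvScan.induct ps with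
  | case1 =>
    intro w _ hw
    rw [pvScan_empty] at hw
    exact hw
  | case2 c t p hfind ih =>
    intro w hbw hw
    rw [pvScan_cons_pos _ _ _ _ _ hfind] at hw
    match w with
    | [] => exact List.nil_prefix
    | a :: w' =>
      exfalso
      obtain ⟨q, rfl⟩ := hR
      rw [List.cons_append, List.cons_prefix_cons] at hw
      exact hbw (hw.1 ▸ List.mem_cons_self)
  | case3 c t hfind ih =>
    intro w hbw hw
    rw [pvScan_cons_neg _ _ _ _ hfind] at hw
    match w with
    | [] => exact List.nil_prefix
    | a :: w' =>
      rw [List.cons_prefix_cons] at hw ⊢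
      refine ⟨hw.1, ih w' (fun hm => hbw (List.mem_cons_of_mem _ hm)) hw.2⟩

-- index computations in `pvPat fL ++ x`
lemma pvSplit (fL x : List Char) :
    pvPat fL ++ x = "basicstyle=\\".toList ++ (fL ++ ("\\ttfamily".toList ++ x)) := by
  simp [pvPat]

lemma pvIdxA (fL x : List Char) (m : ℕ) (hm : m < 12) :
    (pvPat fL ++ x)[m]? = ("basicstyle=\\".toList)[m]? := by
  rw [pvSplit, List.getElem?_append_left (by simpa using hm)]

lemma pvIdxB (fL x : List Char) (m : ℕ) (hm1 : 12 ≤ m) (hm2 : m < 12 + fL.length) :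
    (pvPat fL ++ x)[m]? = fL[m - 12]? := by
  rw [pvSplit, List.getElem?_append_right (by simpa using hm1)]
  have h12 : ("basicstyle=\\".toList).length = 12 := by decide
  rw [h12, List.getElem?_append_left (by omega)]

lemma pvIdxC (fL x : List Char) (m : ℕ) (hm1 : 12 + fL.length ≤ m) (hm2 : m < 21 + fL.length) :
    (pvPat fL ++ x)[m]? = ("\\ttfamily".toList)[m - 12 - fL.length]? := by
  rw [pvSplit, List.getElem?_append_right (by simp; omega)]
  have h12 : ("basicstyle=\\".toList).length = 12 := by decide
  rw [h12, List.getElem?_append_right (by omega), List.getElem?_append_left (by simp; omega)]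

lemma pvIdxPpre (t : List Char) (d : ℕ) (hd : d < 12) :
    (pvPat t)[d]? = ("basicstyle=\\".toList)[d]? := by
  have : pvPat t = "basicstyle=\\".toList ++ (t ++ "\\ttfamily".toList) := by simp [pvPat]
  rw [this, List.getElem?_append_left (by simpa using hd)]

lemma pvIdxPt (t : List Char) (j : ℕ) (hj : j < t.length) :
    (pvPat t)[12 + j]? = t[j]? := by
  have : pvPat t = "basicstyle=\\".toList ++ (t ++ "\\ttfamily".toList) := by simp [pvPat]
  rw [this, List.getElem?_append_right (by simp)]
  have h12 : ("basicstyle=\\".toList).length = 12 := by decide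
  rw [h12]
  have : 12 + j - 12 = j := by omega
  rw [this, List.getElem?_append_left hj]

lemma pvPat_length (s : List Char) : (pvPat s).length = 21 + s.length := by
  simp [pvPat]; omega

-- no pattern can start strictly inside an emitted replacement block (f backslash-free, f ≠ t)
lemma pvNB (fL t : List Char) (hf : '\\' ∉ fL)
    (ht : t = "tiny".toList ∨ t = "small".toList ∨ t = "normalsize".toList ∨ t = "large".toList)
    (hne : fL ≠ t) :
    ∀ (i : ℕ) (x : List Char), i < (pvPat fL).length →
      ¬ (pvPat t).isPrefixOf (List.drop i (pvPat fL ++ x)) := by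
  intro i x hi hpre
  rw [List.isPrefixOf_iff_prefix] at hpre
  have htlen : t.length ≤ 10 ∧ 4 ≤ t.length := by
    rcases ht with rfl | rfl | rfl | rfl <;> simp
  rw [pvPat_length] at hi
  obtain ⟨r, hr⟩ := id hpre
  have hget : ∀ j, j < 21 + t.length → (pvPat t)[j]? = (pvPat fL ++ x)[i + j]? := by
    intro j hj
    have h1 : (pvPat t)[j]? = ((pvPat t) ++ r)[j]? := by
      rw [List.getElem?_append_left (by rw [pvPat_length]; omega)]
    rw [h1, hr, List.getElem?_drop]
  rcases Nat.eq_zero_or_pos i with rfl | hpos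
  · -- i = 0 : forces fL = t, contradicting hne (or a backslash in fL / in a size name)
    have h0 := hpre
    rw [List.drop_zero, pvSplit] at h0
    have h0' : "basicstyle=\\".toList ++ (t ++ "\\ttfamily".toList)
        <+: "basicstyle=\\".toList ++ (fL ++ ("\\ttfamily".toList ++ x)) := by
      simpa [pvPat, List.append_assoc] using h0
    rw [List.prefix_append_right_inj] at h0'
    obtain ⟨r4, hr4⟩ := id h0'
    have eAt : ∀ n, n < t.length + 9 →
        (t ++ "\\ttfamily".toList)[n]? = (fL ++ ("\\ttfamily".toList ++ x))[n]? := by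
      intro n hn
      have h1 : ((t ++ "\\ttfamily".toList) ++ r4)[n]? = (t ++ "\\ttfamily".toList)[n]? :=
        List.getElem?_append_left (by simp; omega)
      rw [← h1, hr4]
    by_cases hle : t.length ≤ fL.length
    · have ht_fL : t <+: fL :=
        List.prefix_of_prefix_length_le ((List.prefix_append t _).trans h0')
          (List.prefix_append _ _) hle
      obtain ⟨r2, hr2⟩ := ht_fL
      rcases r2 with _ | ⟨a, r3⟩
      · exact hne (by simpa using hr2.symm)
      · have e := eAt t.length (by omega)
        rw [List.getElem?_append_right (le_refl _), Nat.sub_self] at e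
        rw [List.getElem?_append_left (by rw [← hr2]; simp)] at e
        have e' : fL[t.length]? = some '\\' := by rw [← e]; decide
        exact hf (List.mem_of_getElem? e')
    · have e := eAt fL.length (by omega)
      rw [List.getElem?_append_left (by omega)] at e
      rw [List.getElem?_append_right (le_refl _), Nat.sub_self] at e
      rw [List.getElem?_append_left (by decide)] at e
      have e' : t[fL.length]? = some '\\' := by rw [e]; decide
      have hmem : ('\\' : Char) ∈ t := List.mem_of_getElem? e'
      rcases ht with rfl | rfl | rfl | rfl <;> simp at hmem
  rcases Nat.lt_or_ge i 12 with h12 | h12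
  · -- 1 ≤ i ≤ 11 : the head 'b' of the pattern falls on a non-'b' char of "basicstyle=\\"
    have e := hget 0 (by omega)
    simp only [Nat.add_zero] at e
    rw [pvIdxA fL x i (by omega)] at e
    have e0 : (pvPat t)[0]? = some 'b' := by rw [pvIdxPpre t 0 (by omega)]; decide
    rw [e0] at e
    interval_cases i <;> revert e <;> decide
  rcases Nat.lt_or_ge i (12 + fL.length) with hfr | hfr
  · -- i inside fL
    rcases Nat.lt_or_ge (i + 11) (12 + fL.length) with hd | hd
    · -- pattern char 11 ('\\') still falls inside fL
      have e := hget 11 (by omega)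
      rw [pvIdxB fL x (i + 11) (by omega) (by omega)] at e
      have e11 : (pvPat t)[11]? = some '\\' := by rw [pvIdxPpre t 11 (by omega)]; decide
      rw [e11] at e
      exact hf (List.mem_of_getElem? e.symm)
    · -- the '\\ttfamily' tail of the block is reached after d ≤ 11 pattern chars
      have hd' : 12 + fL.length - i ≤ 11 := by omega
      set d := 12 + fL.length - i with hddef
      have hd1 : 1 ≤ d := by omega
      rcases Nat.lt_or_ge d 11 with hd10 | hd11
      · have e := hget d (by omega)
        rw [pvIdxC fL x (i + d) (by omega) (by omega)] at e
        have : i + d - 12 - fL.length = 0 := by omega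
        rw [this] at e
        rw [pvIdxPpre t d (by omega)] at e
        interval_cases d <;> revert e <;> decide
      · have hdeq : d = 11 := by omega
        have e12 := hget 12 (by omega)
        rw [pvIdxC fL x (i + 12) (by omega) (by omega)] at e12
        have : i + 12 - 12 - fL.length = 1 := by omega
        rw [this] at e12
        rw [pvIdxPt t 0 (by omega)] at e12
        have e13 := hget 13 (by omega)
        rw [pvIdxC fL x (i + 13) (by omega) (by omega)] at e13
        have : i + 13 - 12 - fL.length = 2 := by omega
        rw [this] at e13
        have h13 : (12 : ℕ) + 1 = 13 := by omega
        rw [← h13, pvIdxPt t 1 (by omega)] at e13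
        rcases ht with rfl | rfl | rfl | rfl <;> revert e12 e13 <;> decide
  · -- i inside the trailing '\\ttfamily'
    have e := hget 0 (by omega)
    rw [pvIdxC fL x (i + 0) (by omega) (by omega)] at e
    rw [pvIdxPpre t 0 (by omega)] at e
    have hk : i - 12 - fL.length < 9 := by omega
    have : i + 0 - 12 - fL.length = i - 12 - fL.length := by omega
    rw [this] at e
    set k := i - 12 - fL.length with hkdef
    interval_cases k <;> revert e <;> decide

-- the step lemma: one replace pass over the scanner's output activates one more pattern
lemma pvSL (fL t : List Char) (hf : '\\' ∉ fL)
    (ht : t = "tiny".toList ∨ t = "small".toList ∨ t = "normalsize".toList ∨ t = "large".toList)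
    (ps : List (List Char)) (hb : ∀ p ∈ ps, ∃ q, p = 'b' :: q) :
    ∀ cs, pvRep (pvPat t) (pvPat fL) (pvScan (pvPat fL) ps cs)
        = pvScan (pvPat fL) (ps ++ [pvPat t]) cs := by
  have hqne : pvPat t ≠ [] := by simp [pvPat]
  have hqt : pvPat t = 'b' :: ("asicstyle=\\".toList ++ t ++ "\\ttfamily".toList) := by
    simp [pvPat]
  have hRcons : ∃ q, pvPat fL = 'b' :: q :=
    ⟨"asicstyle=\\".toList ++ fL ++ "\\ttfamily".toList, by simp [pvPat]⟩
  have hnb : ∀ i, i < (pvPat t).length → 1 ≤ i → ¬ (pvPat t)[i]? = some 'b' := by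
    rcases ht with rfl | rfl | rfl | rfl <;> decide
  have hbfree : 'b' ∉ ("asicstyle=\\".toList ++ t ++ "\\ttfamily".toList) := by
    rcases ht with rfl | rfl | rfl | rfl <;> decide
  have hstep : ∀ X, pvRep (pvPat t) (pvPat fL) (pvPat fL ++ X)
      = pvPat fL ++ pvRep (pvPat t) (pvPat fL) X := by
    intro X
    rcases eq_or_ne fL t with rfl | hft
    · exact pvRep_head _ _ _ hqne
    · exact pvRep_skip _ _ _ _ (fun i hi hp => pvNB fL t hf ht hft i X hi hp)
  have main : ∀ n cs, cs.length ≤ n →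
      pvRep (pvPat t) (pvPat fL) (pvScan (pvPat fL) ps cs)
        = pvScan (pvPat fL) (ps ++ [pvPat t]) cs := by
    intro n
    induction n with
    | zero =>
      intro cs hcs
      have : cs = [] := List.eq_nil_of_length_eq_zero (Nat.le_zero.mp hcs)
      subst this
      rw [pvScan_empty, pvScan_empty, pvRep]
    | succ n ihn =>
      intro cs hcs
      match cs with
      | [] => rw [pvScan_empty, pvScan_empty, pvRep]
      | c :: t' =>
        cases hfind : List.find? (fun p => p.isPrefixOf (c :: t')) ps with
        | some p =>
          have hfind2 : List.find? (fun p => p.isPrefixOf (c :: t')) (ps ++ [pvPat t]) = some p := by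
            rw [List.find?_append, hfind]; rfl
          rw [pvScan_cons_pos _ _ _ _ _ hfind, pvScan_cons_pos _ _ _ _ _ hfind2, hstep]
          congr 1
          exact ihn _ (by simp at hcs ⊢; omega)
        | none =>
          have hnone := List.find?_eq_none.mp hfind
          by_cases hq : (pvPat t).isPrefixOf (c :: t') = true
          · -- the freshly activated pattern matches at the head
            have hfind2 : List.find? (fun p => p.isPrefixOf (c :: t')) (ps ++ [pvPat t])
                = some (pvPat t) := by
              rw [List.find?_append, hfind, Option.none_or]
              simp [List.find?, hq]
            rw [pvScan_cons_pos _ _ _ _ _ hfind2]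
            obtain ⟨rest, hrest⟩ := List.isPrefixOf_iff_prefix.mp hq
            have h2 : 'b' :: (("asicstyle=\\".toList ++ t ++ "\\ttfamily".toList) ++ rest)
                = c :: t' := by rw [← List.cons_append, ← hqt, hrest]
            have hc : c = 'b' := by injection h2 with hh _; exact hh.symm
            have ht' : t' = ("asicstyle=\\".toList ++ t ++ "\\ttfamily".toList) ++ rest := by
              injection h2 with _ hh; exact hh.symm
            have hdrop : List.drop ((pvPat t).length - 1) t' = rest := by
              rw [hqt, ht']
              simp only [List.length_cons, Nat.add_sub_cancel]
              exact List.drop_left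
            have hskipv : pvScan (pvPat fL) ps (pvPat t ++ rest)
                = pvPat t ++ pvScan (pvPat fL) ps rest := by
              apply pvScan_skip
              intro i hi p hp hpref
              rcases Nat.eq_zero_or_pos i with rfl | hipos
              · rw [List.drop_zero, hrest] at hpref
                exact hnone p hp hpref
              · obtain ⟨qp, rfl⟩ := hb p hp
                obtain ⟨rr, hrr⟩ := List.isPrefixOf_iff_prefix.mp hpref
                have e0 : (List.drop i (pvPat t ++ rest))[0]? = some 'b' := by
                  rw [← hrr]; rfl
                rw [List.getElem?_drop, Nat.add_zero, List.getElem?_append_left hi] at e0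
                exact hnb i hi hipos e0
            rw [← hrest, hskipv, pvRep_head _ _ _ hqne, hdrop]
            congr 1
            apply ihn
            have hlen : t'.length ≤ n := by simp at hcs; omega
            have hlen2 := congrArg List.length ht'
            simp at hlen2
            omega
          · -- no pattern matches at the head
            have hfind2 : List.find? (fun p => p.isPrefixOf (c :: t')) (ps ++ [pvPat t]) = none := by
              rw [List.find?_append, hfind, Option.none_or]
              simp [List.find?, hq]
            rw [pvScan_cons_neg _ _ _ _ hfind, pvScan_cons_neg _ _ _ _ hfind2, pvRep]
            have hnp : ¬ (pvPat t).isPrefixOf (c :: pvScan (pvPat fL) ps t') = true := by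
              intro hcontra
              rw [hqt, List.isPrefixOf_iff_prefix, List.cons_prefix_cons] at hcontra
              obtain ⟨hcb, hqpref⟩ := hcontra
              have hqt' : ("asicstyle=\\".toList ++ t ++ "\\ttfamily".toList) <+: t' :=
                pvPR (pvPat fL) hRcons ps t' _ hbfree hqpref
              have : pvPat t <+: c :: t' := by
                rw [hqt]
                exact List.cons_prefix_cons.mpr ⟨hcb, hqt'⟩
              exact hq (List.isPrefixOf_iff_prefix.mpr this)
            rw [if_neg hnp]
            congr 1
            exact ihn t' (by simp at hcs; omega)
  exact fun cs => main cs.length cs (le_refl _)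

lemma pvAlt_eq_scan (repl : List Char) (raw : String) (cs : List Char) :
    pvAltScan repl raw cs = pvScan repl (pvPs raw) cs := by
  have hseg : ∀ (cond : Prop) (_ : Decidable cond) (pat : List Char) (rest : List (List Char)) (l : List Char),
      List.find? (fun p => p.isPrefixOf l) ((if cond then [pat] else []) ++ rest)
        = if cond ∧ pat.isPrefixOf l = true then some pat
          else List.find? (fun p => p.isPrefixOf l) rest := by
    intro cond inst pat rest l
    by_cases hc : cond
    · simp only [if_pos hc]
      by_cases hm : pat.isPrefixOf l = true
      · simp [hm, hc]
      · simp [hm, hc]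
    · simp [hc]
  have main : ∀ n cs, cs.length ≤ n → pvAltScan repl raw cs = pvScan repl (pvPs raw) cs := by
    intro n
    induction n with
    | zero =>
      intro cs hcs
      have : cs = [] := List.eq_nil_of_length_eq_zero (Nat.le_zero.mp hcs)
      subst this
      rw [pvAltScan, pvScan_empty]
    | succ n ihn =>
      intro cs hcs
      match cs with
      | [] => rw [pvAltScan, pvScan_empty]
      | c :: t =>
        have hlt : t.length ≤ n := by simp at hcs; omega
        have hfind : List.find? (fun p => p.isPrefixOf (c :: t)) (pvPs raw)
            = if "tiny" ≠ raw ∧ (pvPat "tiny".toList).isPrefixOf (c :: t) = true then some (pvPat "tiny".toList)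
              else if "small" ≠ raw ∧ (pvPat "small".toList).isPrefixOf (c :: t) = true then some (pvPat "small".toList)
              else if "normalsize" ≠ raw ∧ (pvPat "normalsize".toList).isPrefixOf (c :: t) = true then some (pvPat "normalsize".toList)
              else if "large" ≠ raw ∧ (pvPat "large".toList).isPrefixOf (c :: t) = true then some (pvPat "large".toList)
              else none := by
          rw [pvPs]
          simp only [List.append_assoc]
          rw [hseg _ _ _ _ _, hseg _ _ _ _ _, hseg _ _ _ _ _]
          have hlast : ∀ (cond : Prop) (_ : Decidable cond) (pat : List Char),
              List.find? (fun p => p.isPrefixOf (c :: t)) (if cond then [pat] else [])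
                = if cond ∧ pat.isPrefixOf (c :: t) = true then some pat else none := by
            intro cond inst pat
            have := hseg cond inst pat [] (c :: t)
            simpa using this
          rw [hlast _ _ _]
        rw [pvAltScan]
        simp only [PySem.Chars.startswith] at *
        by_cases h1 : "tiny" ≠ raw ∧ (pvPat "tiny".toList).isPrefixOf (c :: t) = true
        · rw [if_pos h1, pvScan_cons_pos _ _ _ _ _ (by rw [hfind, if_pos h1])]
          have : (pvPat "tiny".toList).length - 1 = 24 := by decide
          rw [this, ihn _ (by simp; omega)]
        · rw [if_neg h1]
          by_cases h2 : "small" ≠ raw ∧ (pvPat "small".toList).isPrefixOf (c :: t) = true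
          · rw [if_pos h2, pvScan_cons_pos _ _ _ _ _ (by rw [hfind, if_neg h1, if_pos h2])]
            have : (pvPat "small".toList).length - 1 = 25 := by decide
            rw [this, ihn _ (by simp; omega)]
          · rw [if_neg h2]
            by_cases h3 : "normalsize" ≠ raw ∧ (pvPat "normalsize".toList).isPrefixOf (c :: t) = true
            · rw [if_pos h3, pvScan_cons_pos _ _ _ _ _ (by rw [hfind, if_neg h1, if_neg h2, if_pos h3])]
              have : (pvPat "normalsize".toList).length - 1 = 30 := by decide
              rw [this, ihn _ (by simp; omega)]
            · rw [if_neg h3]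
              by_cases h4 : "large" ≠ raw ∧ (pvPat "large".toList).isPrefixOf (c :: t) = true
              · rw [if_pos h4, pvScan_cons_pos _ _ _ _ _
                  (by rw [hfind, if_neg h1, if_neg h2, if_neg h3, if_pos h4])]
                have : (pvPat "large".toList).length - 1 = 25 := by decide
                rw [this, ihn _ (by simp; omega)]
              · rw [if_neg h4, pvScan_cons_neg _ _ _ _
                  (by rw [hfind, if_neg h1, if_neg h2, if_neg h3, if_neg h4])]
                rw [ihn _ hlt]
  exact main cs.length cs (le_refl _)

lemma pvPat_cons (s : List Char) : ∃ q, pvPat s = 'b' :: q :=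
  ⟨"asicstyle=\\".toList ++ s ++ "\\ttfamily".toList, by simp [pvPat]⟩

lemma pvStepA (fs raw : String) (hf : '\\' ∉ fs.toList) (s : String)
    (hs : s = "tiny" ∨ s = "small" ∨ s = "normalsize" ∨ s = "large")
    (acc : String) (cs : List Char) (ps : List (List Char)) (hb : ∀ p ∈ ps, ∃ q, p = 'b' :: q)
    (hacc : acc.toList = pvScan (pvPat fs.toList) ps cs) :
    (if s ≠ raw then
        PySem.Str.replace acc (String.ofList (pvPat s.toList)) (String.ofList (pvPat fs.toList))
      else acc).toList
      = pvScan (pvPat fs.toList) (ps ++ if s ≠ raw then [pvPat s.toList] else []) cs := by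
  by_cases hsr : s ≠ raw
  · rw [if_pos hsr, if_pos hsr, PySem.Str.toList_replace, String.toList_ofList,
      String.toList_ofList, pvReplace_eq _ _ _ (by simp [pvPat]), hacc]
    exact pvSL fs.toList s.toList hf (by rcases hs with rfl | rfl | rfl | rfl <;> simp) ps hb _
  · rw [if_neg hsr, if_neg hsr, List.append_nil, hacc]

lemma pvFoldA (fs raw : String) (hf : '\\' ∉ fs.toList) :
    ∀ (sizes : List String), (∀ s ∈ sizes, s = "tiny" ∨ s = "small" ∨ s = "normalsize" ∨ s = "large") →
    ∀ (acc : String) (cs : List Char) (ps : List (List Char)),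
      (∀ p ∈ ps, ∃ q, p = 'b' :: q) → acc.toList = pvScan (pvPat fs.toList) ps cs →
      (List.foldl
          (fun acc size =>
            if size ≠ raw then
              PySem.Str.replace acc (String.ofList (pvPat size.toList))
                (String.ofList (pvPat fs.toList))
            else acc)
          acc sizes).toList
        = pvScan (pvPat fs.toList)
            (ps ++ sizes.flatMap (fun s => if s ≠ raw then [pvPat s.toList] else [])) cs := by
  intro sizes
  induction sizes with
  | nil => intro _ acc cs ps _ hacc; simpa using hacc
  | cons s rest ih =>
    intro hmem acc cs ps hb hacc
    rw [List.foldl_cons]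
    have hstep := pvStepA fs raw hf s (hmem s (by simp)) acc cs ps hb hacc
    have hb' : ∀ p ∈ ps ++ (if s ≠ raw then [pvPat s.toList] else []), ∃ q, p = 'b' :: q := by
      intro p hp
      rcases List.mem_append.mp hp with h | h
      · exact hb p h
      · rcases Decidable.em (s ≠ raw) with hc | hc
        · rw [if_pos hc] at h
          simp at h
          exact h ▸ pvPat_cons _
        · rw [if_neg hc] at h
          simp at h
    have := ih (fun u hu => hmem u (by simp [hu])) _ cs _ hb' hstep
    rw [this, List.flatMap_cons, List.append_assoc]

lemma pvNoMatchOfNoInfix (pat cs : List Char) (hni : ¬ pat <:+: cs) :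
    ∀ i, ¬ pat.isPrefixOf (List.drop i cs) = true := by
  intro i hpref
  exact hni (((List.isPrefixOf_iff_prefix.mp hpref).isInfix).trans
    ((List.drop_suffix i cs).isInfix))

-- ===== VERDICT (by name: the statement is the Claim_ definition above) =====
theorem apply_standard_font_config_py_spec : Claim_equal_apply_standard_font_config_py := by
  intro tex_content font_size_formatted font_size_raw _ hpre
  unfold Spec_apply_standard_font_config_py
  have hofl : ∀ a b : String, a.toList = b.toList → a = b := by
    intro a b h
    rw [← String.ofList_toList (s := a), h, String.ofList_toList]
  apply hofl
  have hB : (apply_standard_font_config_py_alt tex_content font_size_formatted font_size_raw).toList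
      = pvScan (pvPat font_size_formatted.toList) (pvPs font_size_raw) tex_content.toList := by
    rw [apply_standard_font_config_py_alt, String.toList_ofList,
      pvAlt_eq_scan _ font_size_raw tex_content.toList]
  rcases hpre with hf | hni
  · -- font_size_formatted is backslash-free: the four passes accumulate into the single scan
    have hA := pvFoldA font_size_formatted font_size_raw hf
      ["tiny", "small", "normalsize", "large"] (by intro s hs; simpa using hs)
      tex_content tex_content.toList [] (by simp) (by rw [pvScan_nil])
    rw [apply_standard_font_config_py, hB]
    rw [hA]
    congr 1
    rw [pvPs]
    simp [List.append_assoc]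
  · -- no active pattern occurs in tex_content: both sides leave it unchanged
    have hid : ∀ (s : String), (s = "tiny" ∨ s = "small" ∨ s = "normalsize" ∨ s = "large") →
        ∀ acc : String, acc.toList = tex_content.toList →
        (if s ≠ font_size_raw then
            PySem.Str.replace acc (String.ofList (pvPat s.toList))
              (String.ofList (pvPat font_size_formatted.toList))
          else acc).toList = tex_content.toList := by
      intro s hs acc hacc
      by_cases hsr : s ≠ font_size_raw
      · rw [if_pos hsr, PySem.Str.toList_replace, String.toList_ofList, String.toList_ofList,
          pvReplace_eq _ _ _ (by simp [pvPat]), hacc]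
        exact pvRep_id _ _ _ (pvNoMatchOfNoInfix _ _
          (hni s (by rcases hs with rfl | rfl | rfl | rfl <;> simp) hsr))
      · rw [if_neg hsr]; exact hacc
    have hA : (apply_standard_font_config_py tex_content font_size_formatted font_size_raw).toList
        = tex_content.toList := by
      rw [apply_standard_font_config_py]
      simp only [List.foldl_cons, List.foldl_nil]
      exact hid "large" (by simp) _ (hid "normalsize" (by simp) _ (hid "small" (by simp) _
        (hid "tiny" (by simp) _ rfl)))
    have hBid : pvScan (pvPat font_size_formatted.toList) (pvPs font_size_raw) tex_content.toList
        = tex_content.toList := by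
      apply pvScan_id
      intro i p hp
      rw [pvPs] at hp
      simp only [List.append_assoc, List.mem_append] at hp
      have hone : ∀ (s : String), (s = "tiny" ∨ s = "small" ∨ s = "normalsize" ∨ s = "large") →
          p ∈ (if s ≠ font_size_raw then [pvPat s.toList] else []) →
          ¬ p.isPrefixOf (List.drop i tex_content.toList) = true := by
        intro s hs hmem
        rcases Decidable.em (s ≠ font_size_raw) with hc | hc
        · rw [if_pos hc] at hmem
          simp at hmem
          subst hmem
          exact pvNoMatchOfNoInfix _ _
            (hni s (by rcases hs with rfl | rfl | rfl | rfl <;> simp) hc) i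
        · rw [if_neg hc] at hmem
          simp at hmem
      rcases hp with h | h | h | h
      · exact hone "tiny" (by simp) h
      · exact hone "small" (by simp) h
      · exact hone "normalsize" (by simp) h
      · exact hone "large" (by simp) h
    rw [hA, hB, hBid]
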